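-- pv_equiv track=rewrite | github.com/ElderLich/TransSuperpre | Tools/AutoPR_local.py | normalize_lang
-- ===== SOURCE A (Python) =====
-- SUPPORTED_LANGS = {
--     "de": "DE",
--     "en": "EN",
--     "es": "ES",
--     "fr": "FR",
--     "it": "IT",
--     "jp": "JP",
--     "kr": "KR",
--     "pt": "PT",
-- }
--
-- def normalize_lang(value: str | None) -> str | None:
--     if not value:
--         return None
--     key = value.strip().lower().replace("_", "-")
--     if key in SUPPORTED_LANGS:
--         return key
--     for lang, folder in SUPPORTED_LANGS.items():
--         if key == folder.lower():
--             return lang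
--     return None
-- ===== SOURCE B (Python) =====
-- SUPPORTED_LANGS = {
--     "de": "DE",
--     "en": "EN",
--     "es": "ES",
--     "fr": "FR",
--     "it": "IT",
--     "jp": "JP",
--     "kr": "KR",
--     "pt": "PT",
-- }
--
-- _REVERSE = {folder.lower(): lang for lang, folder in SUPPORTED_LANGS.items()}
--
-- def normalize_lang(value):
--     if not value:
--         return None
--     return _REVERSE.get(value.strip().lower().replace("_", "-"))
-- ===== Notes on version B (the rewrite author's own statement) =====
-- stated objective: simpler
-- what changed: Replaces A's membership test plus linear scan over SUPPORTED_LANGS.items() with a single lookup in a precomputed reverse dict keyed by folder.lower().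
import Mathlib
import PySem

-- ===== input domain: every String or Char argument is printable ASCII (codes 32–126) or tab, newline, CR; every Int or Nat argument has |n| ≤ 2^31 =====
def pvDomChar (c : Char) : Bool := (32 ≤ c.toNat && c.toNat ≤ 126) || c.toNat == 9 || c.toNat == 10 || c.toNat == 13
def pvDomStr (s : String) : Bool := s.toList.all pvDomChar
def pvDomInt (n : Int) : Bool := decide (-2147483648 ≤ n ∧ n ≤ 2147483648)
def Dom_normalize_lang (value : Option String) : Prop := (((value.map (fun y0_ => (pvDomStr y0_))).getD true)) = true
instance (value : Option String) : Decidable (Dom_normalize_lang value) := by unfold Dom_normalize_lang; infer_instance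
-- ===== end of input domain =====

-- B replaces A's membership test plus linear scan over the items with one lookup in a precomputed reverse dict (simpler).

-- ===== PORT A =====
def SUPPORTED_LANGS : PySem.Dict String String :=
  PySem.Dict.ofList [("de", "DE"), ("en", "EN"), ("es", "ES"), ("fr", "FR"),
                     ("it", "IT"), ("jp", "JP"), ("kr", "KR"), ("pt", "PT")]

-- the 'for lang, folder in SUPPORTED_LANGS.items(): if key == folder.lower(): return lang' loop
def pvLoopA (key : String) : List (String × String) → Option String
  | [] => none
  | (lang, folder) :: rest =>
      if key = PySem.Str.lower folder then some lang else pvLoopA key rest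

def normalize_lang (value : Option String) : Option String :=
  match value with
  | none => none
  | some v =>
    if v = "" then none  -- 'if not value' on a str: falsy iff empty
    else
      let key := PySem.Str.replace (PySem.Str.lower (PySem.Str.strip v)) "_" "-"
      if SUPPORTED_LANGS.contains key then some key
      else pvLoopA key SUPPORTED_LANGS.items

-- ===== PORT B =====
-- _REVERSE = {folder.lower(): lang for lang, folder in SUPPORTED_LANGS.items()}
def pvREVERSE : PySem.Dict String String :=
  SUPPORTED_LANGS.items.foldl
    (fun d p => d.insert (PySem.Str.lower p.2) p.1) PySem.Dict.empty

def normalize_lang_alt (value : Option String) : Option String :=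
  match value with
  | none => none
  | some v =>
    if v = "" then none
    else pvREVERSE.get? (PySem.Str.replace (PySem.Str.lower (PySem.Str.strip v)) "_" "-")

-- ===== PRECONDITION & SPEC =====
def Spec_normalize_lang (value : Option String) (out : Option String) : Prop := out = normalize_lang_alt value
instance (value : Option String) (out : Option String) : Decidable (Spec_normalize_lang value out) := by unfold Spec_normalize_lang; infer_instance

-- ===== CLAIM (what is proved, stated in full; the proofs are below) =====
def Claim_equal_normalize_lang : Prop := ∀ (value : Option String), Dom_normalize_lang value → Spec_normalize_lang value (normalize_lang value)

-- ===== LEMMAS AND PROOFS =====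

-- core fact: for every key string, A's membership-test-then-scan equals B's reverse-dict lookup
theorem pv_core (k : String) :
    (if SUPPORTED_LANGS.contains k then some k else pvLoopA k SUPPORTED_LANGS.items)
      = pvREVERSE.get? k := by
  by_cases h1 : k = "de"; · subst h1; decide
  by_cases h2 : k = "en"; · subst h2; decide
  by_cases h3 : k = "es"; · subst h3; decide
  by_cases h4 : k = "fr"; · subst h4; decide
  by_cases h5 : k = "it"; · subst h5; decide
  by_cases h6 : k = "jp"; · subst h6; decide
  by_cases h7 : k = "kr"; · subst h7; decide
  by_cases h8 : k = "pt"; · subst h8; decide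
  have hS : SUPPORTED_LANGS = PySem.Dict.mk [("de", "DE"), ("en", "EN"), ("es", "ES"), ("fr", "FR"), ("it", "IT"), ("jp", "JP"), ("kr", "KR"), ("pt", "PT")] := by decide
  have hR : pvREVERSE = PySem.Dict.mk [("de", "de"), ("en", "en"), ("es", "es"), ("fr", "fr"), ("it", "it"), ("jp", "jp"), ("kr", "kr"), ("pt", "pt")] := by decide
  have e1 : PySem.Str.lower "DE" = "de" := by decide
  have e2 : PySem.Str.lower "EN" = "en" := by decide
  have e3 : PySem.Str.lower "ES" = "es" := by decide
  have e4 : PySem.Str.lower "FR" = "fr" := by decide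
  have e5 : PySem.Str.lower "IT" = "it" := by decide
  have e6 : PySem.Str.lower "JP" = "jp" := by decide
  have e7 : PySem.Str.lower "KR" = "kr" := by decide
  have e8 : PySem.Str.lower "PT" = "pt" := by decide
  rw [hS, hR]
  simp [PySem.Dict.get?_mk_cons, PySem.Dict.contains_mk, PySem.Dict.items, pvLoopA,
        e1, e2, e3, e4, e5, e6, e7, e8, h1, h2, h3, h4, h5, h6, h7, h8,
        Ne.symm h1, Ne.symm h2, Ne.symm h3, Ne.symm h4, Ne.symm h5, Ne.symm h6,
        Ne.symm h7, Ne.symm h8, PySem.Dict.get?]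

-- ===== VERDICT (by name: the statement is the Claim_ definition above) =====
theorem normalize_lang_spec : Claim_equal_normalize_lang := by
  intro value _
  unfold Spec_normalize_lang
  cases value with
  | none => rfl
  | some v =>
    unfold normalize_lang normalize_lang_alt
    by_cases hv : v = ""
    · simp [hv]
    · simp only [if_neg hv]
      exact pv_core _
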